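-- pv_equiv track=rewrite | github.com/GPCRmd/GPCRmd | modules/crossreceptor_analysis/views.py | convert_indep_to_tablelike
-- ===== SOURCE A (Python) =====
-- def convert_indep_to_tablelike(dep,indep):
--     rep_dep=len(indep)
--     dep_post=dep*rep_dep
--     rep_indep=len(dep)
--     indep_post=[]
--     for n in indep:
--         indep_post +=[n]*rep_indep
--     return (dep_post,indep_post)
-- ===== SOURCE B (Python) =====
-- def convert_indep_to_tablelike(dep, indep):
--     dep_post = []
--     indep_post = []
--     for n in indep:
--         for d in dep:
--             dep_post.append(d)
--             indep_post.append(n)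
--     return (dep_post, indep_post)
-- ===== Notes on version B (the rewrite author's own statement) =====
-- stated objective: alternative
-- what changed: Replaced A's two separately-shaped passes (list-multiplication for dep_post plus a repetition loop for indep_post) with a single fused nested loop over indep x dep that appends to both output lists at once.
import Mathlib
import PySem

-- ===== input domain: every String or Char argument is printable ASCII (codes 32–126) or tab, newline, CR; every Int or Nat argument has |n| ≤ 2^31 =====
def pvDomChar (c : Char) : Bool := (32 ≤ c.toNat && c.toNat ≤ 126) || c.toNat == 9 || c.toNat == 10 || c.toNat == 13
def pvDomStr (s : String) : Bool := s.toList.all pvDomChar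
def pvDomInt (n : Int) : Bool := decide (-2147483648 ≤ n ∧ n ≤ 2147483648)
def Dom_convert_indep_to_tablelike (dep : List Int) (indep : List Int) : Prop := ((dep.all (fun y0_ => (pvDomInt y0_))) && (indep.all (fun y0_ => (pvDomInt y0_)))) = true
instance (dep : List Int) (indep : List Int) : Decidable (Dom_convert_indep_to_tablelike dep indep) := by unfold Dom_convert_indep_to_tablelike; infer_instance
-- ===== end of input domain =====

-- B fuses A's two separately-shaped passes into one nested loop building both lists at once (objective: alternative decomposition).

-- ===== PORT A =====
-- dep*rep_dep : Python list multiplication = rep_dep concatenated copies of dep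
def convert_indep_to_tablelike (dep : List Int) (indep : List Int) : List Int × List Int :=
  let rep_dep := indep.length
  let dep_post := (List.replicate rep_dep dep).flatten
  let rep_indep := dep.length
  let indep_post := indep.foldl (fun acc n => acc ++ List.replicate rep_indep n) []
  (dep_post, indep_post)

-- ===== PORT B =====
def convert_indep_to_tablelike_alt (dep : List Int) (indep : List Int) : List Int × List Int :=
  indep.foldl
    (fun s n => dep.foldl (fun s d => (s.1 ++ [d], s.2 ++ [n])) s)
    ([], [])

-- ===== PRECONDITION & SPEC =====
def Spec_convert_indep_to_tablelike (dep : List Int) (indep : List Int) (out : List Int × List Int) : Prop := out = convert_indep_to_tablelike_alt dep indep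
instance (dep : List Int) (indep : List Int) (out : List Int × List Int) : Decidable (Spec_convert_indep_to_tablelike dep indep out) := by unfold Spec_convert_indep_to_tablelike; infer_instance

-- ===== CLAIM (what is proved, stated in full; the proofs are below) =====
def Claim_equal_convert_indep_to_tablelike : Prop := ∀ (dep : List Int) (indep : List Int), Dom_convert_indep_to_tablelike dep indep → Spec_convert_indep_to_tablelike dep indep (convert_indep_to_tablelike dep indep)

-- ===== LEMMAS AND PROOFS =====
theorem inner_foldl (dep : List Int) (n : Int) (a b : List Int) :
    dep.foldl (fun s d => (s.1 ++ [d], s.2 ++ [n])) (a, b)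
      = (a ++ dep, b ++ List.replicate dep.length n) := by
  induction dep generalizing a b with
  | nil => simp
  | cons d ds ih =>
      have h : ∀ (k : Nat), n :: List.replicate k n = List.replicate k n ++ [n] := by
        intro k; rw [← List.replicate_succ, List.replicate_succ']
      simp [List.foldl_cons, ih, List.replicate_succ', h]

theorem outer_foldl (dep : List Int) (indep : List Int) (a b : List Int) :
    indep.foldl (fun s n => dep.foldl (fun s d => (s.1 ++ [d], s.2 ++ [n])) s) (a, b)
      = (a ++ (List.replicate indep.length dep).flatten,
         indep.foldl (fun acc n => acc ++ List.replicate dep.length n) b) := by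
  induction indep generalizing a b with
  | nil => simp
  | cons n ns ih =>
      simp [List.foldl_cons, inner_foldl, ih, List.replicate_succ, List.append_assoc]

-- ===== VERDICT (by name: the statement is the Claim_ definition above) =====
theorem convert_indep_to_tablelike_spec : Claim_equal_convert_indep_to_tablelike := by
  intro dep indep _
  unfold Spec_convert_indep_to_tablelike convert_indep_to_tablelike convert_indep_to_tablelike_alt
  rw [outer_foldl]
  simp
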